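-- pv_equiv track=rewrite | github.com/Mervyn-1/TOD-Chinese | reader.py | bucket_by_turn
-- ===== SOURCE A (Python) =====
-- from collections import OrderedDict
--
-- def bucket_by_turn(encoded_data):
--     turn_bucket = {}
--     for dial in encoded_data:
--         turn_len = len(dial)
--         if turn_len not in turn_bucket:
--             turn_bucket[turn_len] = []
--         turn_bucket[turn_len].append(dial)
--
--     return OrderedDict(sorted(turn_bucket.items(), key=lambda i: i[0]))
-- ===== SOURCE B (Python) =====
-- from collections import OrderedDict
--
-- def bucket_by_turn(encoded_data):
--     lengths = sorted({len(d) for d in encoded_data})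
--     return OrderedDict((L, [d for d in encoded_data if len(d) == L]) for L in lengths)
-- ===== Notes on version B (the rewrite author's own statement) =====
-- stated objective: alternative
-- what changed: Replaces the hash-bucket-then-sort-items strategy with: sort the distinct lengths once, then emit (length, filter) per length by scanning the input, with no mutable dict of buckets.
import Mathlib
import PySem

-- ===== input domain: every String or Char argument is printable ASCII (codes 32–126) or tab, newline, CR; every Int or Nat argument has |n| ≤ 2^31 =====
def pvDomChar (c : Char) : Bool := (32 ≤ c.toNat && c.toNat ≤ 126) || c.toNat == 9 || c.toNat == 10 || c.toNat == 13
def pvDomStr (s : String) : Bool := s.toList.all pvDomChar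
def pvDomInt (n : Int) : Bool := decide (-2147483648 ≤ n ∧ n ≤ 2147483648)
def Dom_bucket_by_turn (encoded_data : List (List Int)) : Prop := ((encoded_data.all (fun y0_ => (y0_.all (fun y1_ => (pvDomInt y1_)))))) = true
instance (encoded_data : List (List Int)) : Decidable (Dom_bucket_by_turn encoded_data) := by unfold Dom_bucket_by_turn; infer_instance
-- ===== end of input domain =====

-- B replaces A's hash-bucket-then-sort-items strategy by sorting the distinct lengths and filtering per length (alternative decomposition, same results).

-- ===== PORT A =====
-- one iteration of A's loop body: setdefault-style 'if turn_len not in bucket: bucket[turn_len] = []' then append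
def bucketStep (d : PySem.Dict Int (List (List Int))) (dial : List Int) :
    PySem.Dict Int (List (List Int)) :=
  let turn_len : Int := (dial.length : Int)
  let d' := if d.contains turn_len then d else d.insert turn_len []
  d'.modify turn_len [] (fun l => l ++ [dial])

def bucket_by_turn (encoded_data : List (List Int)) : List (Int × List (List Int)) :=
  let turn_bucket := encoded_data.foldl bucketStep PySem.Dict.empty
  PySem.List.sorted turn_bucket.items (fun p => p.1) false

-- ===== PORT B =====
def bucket_by_turn_alt (encoded_data : List (List Int)) : List (Int × List (List Int)) :=
  let lengths := PySem.List.sorted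
    (PySem.Set.ofList (encoded_data.map (fun d => (d.length : Int)))) (fun x => x) false
  lengths.map (fun L => (L, encoded_data.filter (fun d => (d.length : Int) == L)))

-- ===== PRECONDITION & SPEC =====
def Spec_bucket_by_turn (encoded_data : List (List Int)) (out : List (Int × List (List Int))) : Prop := out = bucket_by_turn_alt encoded_data
instance (encoded_data : List (List Int)) (out : List (Int × List (List Int))) : Decidable (Spec_bucket_by_turn encoded_data out) := by unfold Spec_bucket_by_turn; infer_instance

-- ===== CLAIM (what is proved, stated in full; the proofs are below) =====
def Claim_equal_bucket_by_turn : Prop := ∀ (encoded_data : List (List Int)), Dom_bucket_by_turn encoded_data → Spec_bucket_by_turn encoded_data (bucket_by_turn encoded_data)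

-- ===== LEMMAS AND PROOFS =====

-- A's loop body is a single 'modify with default []' on the dict
theorem bucketStep_eq_modify (d : PySem.Dict Int (List (List Int))) (dial : List Int) :
    bucketStep d dial = d.modify ((dial.length : Int)) [] (fun l => l ++ [dial]) := by
  unfold bucketStep
  by_cases h : d.contains ((dial.length : Int)) = true
  · simp [h]
  · simp only [Bool.not_eq_true] at h
    simp [h, PySem.Dict.modify, PySem.Dict.getD_of_not_contains _ _ h, PySem.Dict.insert_insert_self]

theorem bucket_dict_eq (encoded_data : List (List Int)) :
    encoded_data.foldl bucketStep PySem.Dict.empty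
      = (encoded_data.map (fun dial => ((dial.length : Int), dial))).foldl
          (fun d p => d.modify p.1 [] (fun l => l ++ [p.2])) PySem.Dict.empty := by
  rw [List.foldl_map]
  exact PySem.List.foldl_congr_mem _ _ _ _ (fun acc x _ => bucketStep_eq_modify acc x)

theorem bucket_dict_items (encoded_data : List (List Int)) :
    (encoded_data.foldl bucketStep PySem.Dict.empty).items
      = (PySem.Set.ofList (encoded_data.map (fun d => (d.length : Int)))).map
          (fun k => (k, encoded_data.filter (fun d => (d.length : Int) == k))) := by
  rw [bucket_dict_eq]
  set l := encoded_data.map (fun dial => ((dial.length : Int), dial)) with hl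
  set D := l.foldl (fun d p => d.modify p.1 [] (fun l => l ++ [p.2])) PySem.Dict.empty with hD
  have hnd : D.keys.Nodup := by
    rw [hD]
    exact PySem.Dict.nodup_keys_foldl_modify_key l (fun p => p.1) []
      (fun d p => fun l => l ++ [p.2]) PySem.Dict.empty (by simp)
  have hkeys : D.keys = PySem.Set.ofList (encoded_data.map (fun d => (d.length : Int))) := by
    rw [hD]
    have := PySem.Dict.keys_foldl_modify_key (l := l) (key := fun p => p.1)
      (d0 := []) (f := fun d p => fun l => l ++ [p.2]) (d := PySem.Dict.empty)
    simp only [PySem.Dict.keys_empty] at this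
    rw [this, hl, List.map_map]
    rfl
  rw [PySem.Dict.items_eq_map_keys D hnd [], hkeys]
  refine List.map_congr_left (fun k _ => ?_)
  have hget : D.getD k [] = (l.filter (fun p => p.1 == k)).map (·.2) := by
    rw [hD]
    have := PySem.Dict.getD_foldl_modify_append (l := l) (d := PySem.Dict.empty) (c := k)
    simpa using this
  rw [hget, hl, List.filter_map, List.map_map]
  simp [Function.comp_def]

-- map over a strictly key-sorted list names A's sort of the items
theorem items_sorted (encoded_data : List (List Int)) :
    PySem.List.sorted ((encoded_data.foldl bucketStep PySem.Dict.empty).items)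
      (fun p => p.1) false
    = (PySem.List.sorted
        (PySem.Set.ofList (encoded_data.map (fun d => (d.length : Int)))) (fun x => x) false).map
        (fun k => (k, encoded_data.filter (fun d => (d.length : Int) == k))) := by
  rw [bucket_dict_items]
  set ks := PySem.Set.ofList (encoded_data.map (fun d => (d.length : Int))) with hks
  set f := fun k : Int => (k, encoded_data.filter (fun d => (d.length : Int) == k)) with hf
  apply PySem.List.sorted_eq_of_perm_of_pairwise_lt
  · exact List.Perm.map f (PySem.List.sorted_perm ks (fun x => x) false).symm |>.symm
  · have hp : (PySem.List.sorted ks (fun x => x) false).Pairwise (· < ·) := by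
      rw [hks]; exact PySem.List.sorted_ofList_pairwise_lt _
    exact List.Pairwise.map f (fun a b h => h) hp

-- ===== VERDICT (by name: the statement is the Claim_ definition above) =====
theorem bucket_by_turn_spec : Claim_equal_bucket_by_turn := by
  intro encoded_data _
  unfold Spec_bucket_by_turn bucket_by_turn bucket_by_turn_alt
  exact items_sorted encoded_data
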